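-- pv_equiv track=rewrite | github.com/WINGS-N/unica-wb | backend/app/ff_utils.py | apply_custom_features
-- ===== SOURCE A (Python) =====
-- from collections import OrderedDict
--
-- def apply_custom_features(base: OrderedDict[str, str], custom: OrderedDict[str, str]) -> OrderedDict[str, str]:
--     out = OrderedDict(base)
--     for key, value in custom.items():
--         if not value:
--             out.pop(key, None)
--         else:
--             out[key] = value
--     return out
-- ===== SOURCE B (Python) =====
-- from collections import OrderedDict
--
-- def apply_custom_features(base: OrderedDict[str, str], custom: OrderedDict[str, str]) -> OrderedDict[str, str]:
--     out = OrderedDict()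
--     for key, value in base.items():
--         if key in custom:
--             if custom[key]:
--                 out[key] = custom[key]
--         else:
--             out[key] = value
--     for key, value in custom.items():
--         if key not in base and value:
--             out[key] = value
--     return out
-- ===== Notes on version B (the rewrite author's own statement) =====
-- stated objective: alternative
-- what changed: Instead of copying base and mutating it (overwrite/pop) per custom entry, B builds the result functionally in two passes: one over base deciding keep/override/drop per key, and one over custom appending new truthy keys; no in-place mutation of a copy.
import Mathlib
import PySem

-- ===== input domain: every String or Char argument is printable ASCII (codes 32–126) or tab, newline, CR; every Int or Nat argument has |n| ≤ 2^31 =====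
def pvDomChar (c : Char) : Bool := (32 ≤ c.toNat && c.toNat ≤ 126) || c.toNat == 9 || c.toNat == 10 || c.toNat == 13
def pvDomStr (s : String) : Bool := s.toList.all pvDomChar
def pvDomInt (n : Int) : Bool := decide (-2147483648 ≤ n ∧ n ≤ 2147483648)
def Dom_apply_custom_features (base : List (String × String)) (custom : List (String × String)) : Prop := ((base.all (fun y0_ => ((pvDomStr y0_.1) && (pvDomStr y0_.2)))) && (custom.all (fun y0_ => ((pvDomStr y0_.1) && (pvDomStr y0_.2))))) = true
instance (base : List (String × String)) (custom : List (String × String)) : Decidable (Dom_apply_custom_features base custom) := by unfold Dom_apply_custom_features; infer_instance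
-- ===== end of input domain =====

-- B builds the merged dict functionally in two passes (filter/override base, then append new truthy custom keys) instead of mutating a copy of base; same asymptotic cost, different decomposition.

-- ===== PORT A =====
-- out = OrderedDict(base); for key, value in custom.items(): if not value: out.pop(key, None) else: out[key] = value; return out
def apply_custom_features (base : List (String × String)) (custom : List (String × String)) : List (String × String) :=
  (custom.foldl
    (fun out kv => if kv.2 = "" then out.erase kv.1 else out.insert kv.1 kv.2)
    (PySem.Dict.mk base)).items

-- ===== PORT B =====
-- first pass over base.items(): override with truthy custom value, keep, or drop;
-- second pass over custom.items(): append keys not in base with truthy value.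
def apply_custom_features_alt (base : List (String × String)) (custom : List (String × String)) : List (String × String) :=
  (base.filterMap (fun p =>
      match custom.lookup p.1 with
      | some cv => if cv = "" then none else some (p.1, cv)
      | none => some p))
  ++ custom.filter (fun p => (base.lookup p.1 == none) && !(p.2 == ""))

-- ===== PRECONDITION & SPEC =====
-- The list arguments encode Python dicts (OrderedDict parameters), whose keys are necessarily
-- unique; Pre_ excludes only association lists with duplicate keys, which encode no dict argument.
def Pre_apply_custom_features (base : List (String × String)) (custom : List (String × String)) : Prop :=
  (base.map Prod.fst).Nodup ∧ (custom.map Prod.fst).Nodup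
instance (base : List (String × String)) (custom : List (String × String)) : Decidable (Pre_apply_custom_features base custom) := by unfold Pre_apply_custom_features; infer_instance

def pvWitness_apply_custom_features : (List (String × String)) × (List (String × String)) :=
  ([("a", "1"), ("b", "2")], [("a", ""), ("c", "3")])

def Spec_apply_custom_features (base : List (String × String)) (custom : List (String × String)) (out : List (String × String)) : Prop := out = apply_custom_features_alt base custom
instance (base : List (String × String)) (custom : List (String × String)) (out : List (String × String)) : Decidable (Spec_apply_custom_features base custom out) := by unfold Spec_apply_custom_features; infer_instance

-- ===== CLAIM (what is proved, stated in full; the proofs are below) =====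
def Claim_equal_apply_custom_features : Prop := ∀ (base : List (String × String)) (custom : List (String × String)), Dom_apply_custom_features base custom → Pre_apply_custom_features base custom → Spec_apply_custom_features base custom (apply_custom_features base custom)

-- ===== LEMMAS AND PROOFS =====

-- A's loop body, named for the proofs.
def pvStep (out : PySem.Dict String String) (kv : String × String) : PySem.Dict String String :=
  if kv.2 = "" then out.erase kv.1 else out.insert kv.1 kv.2

-- B's first-pass body, named for the proofs.
def pvOv (custom : List (String × String)) (p : String × String) : Option (String × String) :=
  match custom.lookup p.1 with
  | some cv => if cv = "" then none else some (p.1, cv)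
  | none => some p

theorem pvLookup_cons (x : String) (p : String × String) (t : List (String × String)) :
    List.lookup x (p :: t) = if x = p.1 then some p.2 else List.lookup x t := by
  simp only [List.lookup]
  by_cases h : x = p.1
  · simp [h]
  · have hb : (x == p.1) = false := by simp [h]
    rw [hb, if_neg h]

theorem pvLookup_eq_none {l : List (String × String)} {k : String} (h : k ∉ l.map Prod.fst) :
    List.lookup k l = none := by
  induction l with
  | nil => rfl
  | cons p t ih =>
    simp only [List.map_cons, List.mem_cons, not_or] at h
    rw [pvLookup_cons, if_neg h.1]
    exact ih h.2

theorem pvLookup_isSome {l : List (String × String)} {k : String} (h : k ∈ l.map Prod.fst) :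
    (List.lookup k l).isSome = true := by
  induction l with
  | nil => simp at h
  | cons p t ih =>
    simp only [List.map_cons, List.mem_cons] at h
    rw [pvLookup_cons]
    by_cases hp : k = p.1
    · simp [hp]
    · rw [if_neg hp]
      exact ih (h.resolve_left hp)

theorem pvLookup_filter {l : List (String × String)} {x k : String} (h : x ≠ k) :
    List.lookup x (l.filter fun p => !(p.1 == k)) = List.lookup x l := by
  induction l with
  | nil => rfl
  | cons p t ih =>
    by_cases hp : p.1 = k
    · rw [List.filter_cons, if_neg (by simp [hp]), pvLookup_cons,
        if_neg (fun he : x = p.1 => h (hp ▸ he))]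
      exact ih
    · rw [List.filter_cons, if_pos (by simp [hp]), pvLookup_cons, pvLookup_cons, ih]

theorem pvLookup_map {l : List (String × String)} {x k : String} {v : String} (h : x ≠ k) :
    List.lookup x (l.map fun p => if p.1 == k then (k, v) else p) = List.lookup x l := by
  induction l with
  | nil => rfl
  | cons p t ih =>
    by_cases hp : p.1 = k
    · rw [List.map_cons, if_pos (by simp [hp]), pvLookup_cons, pvLookup_cons, ih,
        if_neg (fun he : x = (k, v).1 => h he), if_neg (fun he : x = p.1 => h (hp ▸ he))]
    · rw [List.map_cons, if_neg (by simp [hp]), pvLookup_cons, pvLookup_cons, ih]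

-- pass 1, override case with an empty custom value: dropping via erase = dropping in the filterMap
theorem pvA (k : String) (rest l : List (String × String)) :
    l.filterMap (pvOv ((k, "") :: rest))
      = (l.filter fun p => !(p.1 == k)).filterMap (pvOv rest) := by
  induction l with
  | nil => rfl
  | cons p t ih =>
    by_cases hp : p.1 = k
    · have h1 : pvOv ((k, "") :: rest) p = none := by
        simp [pvOv, pvLookup_cons, hp]
      rw [List.filterMap_cons, h1, List.filter_cons, if_neg (by simp [hp])]
      exact ih
    · simp only [List.filterMap_cons, List.filter_cons, show (!(p.1 == k)) = true by simp [hp],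
        if_true]
      have : pvOv ((k, "") :: rest) p = pvOv rest p := by
        simp [pvOv, pvLookup_cons, fun h : p.1 = k => hp h]
      rw [this, ih]

-- pass 1, override case with a truthy custom value: in-place overwrite = override in the filterMap
theorem pvC {k v : String} (hv : v ≠ "") {rest : List (String × String)}
    (hkrest : List.lookup k rest = none) (l : List (String × String)) :
    l.filterMap (pvOv ((k, v) :: rest))
      = (l.map fun p => if p.1 == k then (k, v) else p).filterMap (pvOv rest) := by
  rw [List.filterMap_map]
  apply List.filterMap_congr
  intro p _
  by_cases hp : p.1 = k
  · simp [pvOv, Function.comp, hp, pvLookup_cons, hv, hkrest]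
  · simp [pvOv, Function.comp, show (p.1 == k) = false by simp [hp], pvLookup_cons, hp]

-- Main invariant: folding A's loop over `custom` from an arbitrary item list `l`
-- produces exactly B's two-pass result, provided custom's keys are distinct.
theorem pvMain : ∀ (custom l : List (String × String)), (custom.map Prod.fst).Nodup →
    (custom.foldl pvStep (PySem.Dict.mk l)).items
      = l.filterMap (pvOv custom)
        ++ custom.filter (fun p => (l.lookup p.1 == none) && !(p.2 == "")) := by
  intro custom
  induction custom with
  | nil =>
    intro l _
    simp [pvOv]
  | cons kv rest ih =>
    intro l hnd
    obtain ⟨k, v⟩ := kv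
    simp only [List.map_cons, List.nodup_cons] at hnd
    obtain ⟨hk, hrest⟩ := hnd
    have hkrest : List.lookup k rest = none := pvLookup_eq_none hk
    rw [List.foldl_cons]
    by_cases hv : v = ""
    · subst hv
      have hstep : pvStep (PySem.Dict.mk l) (k, "")
          = PySem.Dict.mk (l.filter fun p => !(p.1 == k)) := by
        simp [pvStep, PySem.Dict.erase]
      rw [hstep, ih _ hrest, List.filter_cons]
      simp only [show ((List.lookup k l == none) && !(("" : String) == "")) = false by simp,
        if_false]
      congr 1
      · exact (pvA k rest l).symm
      · apply List.filter_congr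
        intro p hp
        have hpk : p.1 ≠ k := fun he => hk (he ▸ (List.mem_map_of_mem hp : p.1 ∈ rest.map Prod.fst))
        rw [pvLookup_filter hpk]
    · by_cases hc : (PySem.Dict.mk l).contains k = true
      · have hstep : pvStep (PySem.Dict.mk l) (k, v)
            = PySem.Dict.mk (l.map fun p => if p.1 == k then (k, v) else p) := by
          simp [pvStep, hv, PySem.Dict.insert, hc]
        have hmem : k ∈ l.map Prod.fst := by
          simp only [PySem.Dict.contains, List.any_eq_true] at hc
          obtain ⟨p, hp, he⟩ := hc
          exact (beq_iff_eq.mp he) ▸ List.mem_map_of_mem hp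
        have hsome : (List.lookup k l).isSome = true := pvLookup_isSome hmem
        rw [hstep, ih _ hrest, List.filter_cons]
        simp only [show ((List.lookup k l == none) && !(v == "")) = false by
          cases h : List.lookup k l with
          | none => rw [h] at hsome; simp at hsome
          | some w => simp, if_false]
        congr 1
        · exact (pvC hv hkrest l).symm
        · apply List.filter_congr
          intro p hp
          have hpk : p.1 ≠ k := fun he => hk (he ▸ (List.mem_map_of_mem hp : p.1 ∈ rest.map Prod.fst))
          rw [pvLookup_map hpk]
      · have hstep : pvStep (PySem.Dict.mk l) (k, v)
            = PySem.Dict.mk (l ++ [(k, v)]) := by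
          simp only [pvStep, hv, if_false, PySem.Dict.insert]
          rw [if_neg hc]
        have hall : ∀ p ∈ l, p.1 ≠ k := by
          intro p hp he
          exact hc (by
            simp only [PySem.Dict.contains]
            exact List.any_eq_true.mpr ⟨p, hp, by simp [he]⟩)
        have hnone : List.lookup k l = none :=
          pvLookup_eq_none (by
            intro hm
            obtain ⟨p, hp, he⟩ := List.mem_map.mp hm
            exact hall p hp he)
        rw [hstep, ih _ hrest, List.filter_cons]
        simp only [hnone, show ((none == (none : Option String)) && !(v == "")) = true by
          simp [hv], if_true]
        rw [List.filterMap_append]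
        have h1 : l.filterMap (pvOv rest) = l.filterMap (pvOv ((k, v) :: rest)) := by
          apply List.filterMap_congr
          intro p hp
          simp [pvOv, pvLookup_cons, hall p hp]
        have h2 : List.filterMap (pvOv rest) [(k, v)] = [(k, v)] := by
          simp [pvOv, pvLookup_cons, hkrest, hv]
        rw [h1, h2]
        have h3 : rest.filter (fun p => ((l ++ [(k, v)]).lookup p.1 == none) && !(p.2 == ""))
            = rest.filter (fun p => (l.lookup p.1 == none) && !(p.2 == "")) := by
          apply List.filter_congr
          intro p hp
          have hpk : p.1 ≠ k := fun he => hk (he ▸ (List.mem_map_of_mem hp : p.1 ∈ rest.map Prod.fst))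
          rw [List.lookup_append, show List.lookup p.1 [(k, v)] = none by
            rw [pvLookup_cons, if_neg (fun h : p.1 = (k, v).1 => hpk h)]; rfl]
          cases List.lookup p.1 l <;> rfl
        rw [h3, List.append_assoc]
        rfl

-- ===== VERDICT (by name: the statement is the Claim_ definition above) =====
theorem apply_custom_features_spec : Claim_equal_apply_custom_features := by
  intro base custom _ hpre
  exact pvMain custom base hpre.2
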